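-- pv_equiv track=rewrite | github.com/StytsenkovaVS/NIRstytsenkova631_g6_only_connected_multithread_pool | main.py | is_perfect_dominating_set
-- ===== SOURCE A (Python) =====
-- def is_perfect_dominating_set(adj_matrix, subset):
--     n = len(adj_matrix)
--     for vertex in range(n):
--         if vertex not in subset:
--             neighbors_count = sum(adj_matrix[vertex][neighbor] for neighbor in subset)
--             if neighbors_count != 1:
--                 return False
--     return True
-- ===== SOURCE B (Python) =====
-- def is_perfect_dominating_set(adj_matrix, subset):
--     n = len(adj_matrix)
--     members = set(subset)
--     counts = [0] * n
--     for s in subset: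
--         counts = [counts[v] if v in members else counts[v] + adj_matrix[v][s]
--                   for v in range(n)]
--     return all(v in members or counts[v] == 1 for v in range(n))
-- ===== Notes on version B (the rewrite author's own statement) =====
-- stated objective: alternative
-- what changed: Swapped the loop nesting: instead of a per-vertex inner sum over subset, B builds a counts table by iterating subset members in the outer loop and accumulating into every non-subset vertex, then verifies all counts in a separate pass (and uses a set for membership).
-- outside the precondition, e.g. on is_perfect_dominating_set([[0, 0, 2], [0]], [2]): A returns False, B raises IndexError
import Mathlib
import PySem

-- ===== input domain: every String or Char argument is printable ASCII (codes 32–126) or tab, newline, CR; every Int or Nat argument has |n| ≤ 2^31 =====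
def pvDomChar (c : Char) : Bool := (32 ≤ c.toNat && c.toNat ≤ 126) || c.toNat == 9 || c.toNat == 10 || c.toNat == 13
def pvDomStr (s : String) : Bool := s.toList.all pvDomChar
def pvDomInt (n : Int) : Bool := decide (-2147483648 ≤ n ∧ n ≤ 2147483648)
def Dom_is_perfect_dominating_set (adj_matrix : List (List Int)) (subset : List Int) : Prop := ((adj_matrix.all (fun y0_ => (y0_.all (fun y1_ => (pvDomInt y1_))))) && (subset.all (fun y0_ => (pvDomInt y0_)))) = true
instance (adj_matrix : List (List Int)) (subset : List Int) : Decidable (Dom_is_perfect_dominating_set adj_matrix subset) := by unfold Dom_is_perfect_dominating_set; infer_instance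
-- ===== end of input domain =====

-- B swaps the loop nesting (outer loop over subset building a counts table, then a
-- separate verification pass, set membership) instead of A's per-vertex inner sum;
-- objective: alternative decomposition, same asymptotic cost.

-- ===== PORT A =====
-- literal port of A; indexing uses pyGetD, in range under Pre_ (IndexError excluded by Pre_)
def is_perfect_dominating_set (adj_matrix : List (List Int)) (subset : List Int) : Bool :=
  let n : Int := adj_matrix.length
  (PySem.List.pyRange 0 n 1).all (fun vertex =>
    if subset.contains vertex then true
    else
      (subset.foldl (fun acc neighbor =>
        acc + PySem.List.pyGetD (PySem.List.pyGetD adj_matrix vertex []) neighbor 0) 0) == 1)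

-- ===== PORT B =====
def is_perfect_dominating_set_alt (adj_matrix : List (List Int)) (subset : List Int) : Bool :=
  let n : Int := adj_matrix.length
  let members : PySem.Set Int := PySem.Set.ofList subset
  let counts0 : List Int := List.replicate adj_matrix.length 0
  let counts := subset.foldl (fun counts s =>
    (PySem.List.pyRange 0 n 1).map (fun v =>
      if PySem.Set.contains members v then PySem.List.pyGetD counts v 0
      else PySem.List.pyGetD counts v 0
           + PySem.List.pyGetD (PySem.List.pyGetD adj_matrix v []) s 0)) counts0
  (PySem.List.pyRange 0 n 1).all (fun v =>
    PySem.Set.contains members v || PySem.List.pyGetD counts v 0 == 1)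

-- ===== PRECONDITION & SPEC =====
-- Pre_ excludes inputs where some non-subset row is given a subset index out of its range:
-- there Python raises IndexError (in A unless an earlier row already failed the count
-- check, in which case A returns False while B, scanning all rows, still raises).
def Pre_is_perfect_dominating_set (adj_matrix : List (List Int)) (subset : List Int) : Prop :=
  ∀ v ∈ List.range adj_matrix.length, ¬ ((v : Int) ∈ subset) →
    ∀ s ∈ subset, -((adj_matrix.getD v []).length : Int) ≤ s ∧ s < ((adj_matrix.getD v []).length : Int)
instance (adj_matrix : List (List Int)) (subset : List Int) : Decidable (Pre_is_perfect_dominating_set adj_matrix subset) := by unfold Pre_is_perfect_dominating_set; infer_instance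

def pvWitness_is_perfect_dominating_set : List (List Int) × List Int := ([[0, 1], [1, 0]], [1])

def Spec_is_perfect_dominating_set (adj_matrix : List (List Int)) (subset : List Int) (out : Bool) : Prop := out = is_perfect_dominating_set_alt adj_matrix subset
instance (adj_matrix : List (List Int)) (subset : List Int) (out : Bool) : Decidable (Spec_is_perfect_dominating_set adj_matrix subset out) := by unfold Spec_is_perfect_dominating_set; infer_instance

-- ===== CLAIM (what is proved, stated in full; the proofs are below) =====
def Claim_equal_is_perfect_dominating_set : Prop := ∀ (adj_matrix : List (List Int)) (subset : List Int), Dom_is_perfect_dominating_set adj_matrix subset → Pre_is_perfect_dominating_set adj_matrix subset → Spec_is_perfect_dominating_set adj_matrix subset (is_perfect_dominating_set adj_matrix subset)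

-- ===== LEMMAS AND PROOFS =====

theorem pv_foldl_add_init (f : Int → Int) (l : List Int) (a b : Int) :
    l.foldl (fun acc x => acc + f x) (a + b) = a + l.foldl (fun acc x => acc + f x) b := by
  induction l generalizing a b with
  | nil => simp
  | cons x xs ih => simp only [List.foldl_cons]; rw [add_assoc, ih]

-- B's outer fold keeps counts in the shape "map of a pointwise function over the range",
-- adding the matrix entry for s to every non-member slot each pass.
theorem pv_fold_counts (adj_matrix : List (List Int)) (subset : List Int)
    (ss : List Int) (g : Int → Int) :
    ss.foldl (fun counts s =>
      (PySem.List.pyRange 0 (adj_matrix.length : Int) 1).map (fun v =>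
        if PySem.Set.contains (PySem.Set.ofList subset) v then PySem.List.pyGetD counts v 0
        else PySem.List.pyGetD counts v 0
             + PySem.List.pyGetD (PySem.List.pyGetD adj_matrix v []) s 0))
      ((PySem.List.pyRange 0 (adj_matrix.length : Int) 1).map g)
    = (PySem.List.pyRange 0 (adj_matrix.length : Int) 1).map (fun v =>
        if PySem.Set.contains (PySem.Set.ofList subset) v then g v
        else g v + ss.foldl (fun acc s =>
              acc + PySem.List.pyGetD (PySem.List.pyGetD adj_matrix v []) s 0) 0) := by
  induction ss generalizing g with
  | nil =>
    simp only [List.foldl_nil]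
    apply List.map_congr_left
    intro v hv
    by_cases hm : PySem.Set.contains (PySem.Set.ofList subset) v
    · rw [if_pos hm]
    · rw [if_neg hm, add_zero]
  | cons s ss ih =>
    simp only [List.foldl_cons]
    rw [show ((PySem.List.pyRange 0 (adj_matrix.length : Int) 1).map (fun v =>
        if PySem.Set.contains (PySem.Set.ofList subset) v then PySem.List.pyGetD ((PySem.List.pyRange 0 (adj_matrix.length : Int) 1).map g) v 0
        else PySem.List.pyGetD ((PySem.List.pyRange 0 (adj_matrix.length : Int) 1).map g) v 0
             + PySem.List.pyGetD (PySem.List.pyGetD adj_matrix v []) s 0))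
      = (PySem.List.pyRange 0 (adj_matrix.length : Int) 1).map (fun v =>
        if PySem.Set.contains (PySem.Set.ofList subset) v then g v
        else g v + PySem.List.pyGetD (PySem.List.pyGetD adj_matrix v []) s 0) from ?_]
    · rw [ih]
      apply List.map_congr_left
      intro v hv
      by_cases hm : PySem.Set.contains (PySem.Set.ofList subset) v
      · simp only [if_pos hm]
      · simp only [if_neg hm, zero_add]
        have h1 := pv_foldl_add_init
          (fun x => PySem.List.pyGetD (PySem.List.pyGetD adj_matrix v []) x 0) ss
          (PySem.List.pyGetD (PySem.List.pyGetD adj_matrix v []) s 0) 0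
        simp only [add_zero] at h1
        rw [h1]
        ring
    · apply List.map_congr_left
      intro v hv
      rw [PySem.List.mem_pyRange_one] at hv
      rw [PySem.List.pyGetD_map_pyRange_of_nonneg g (adj_matrix.length : Int) v 0 hv.1 hv.2]

theorem pv_members_contains (subset : List Int) (v : Int) :
    PySem.Set.contains (PySem.Set.ofList subset) v = subset.contains v := by
  rw [Bool.eq_iff_iff]
  simp [PySem.Set.contains, PySem.Set.mem_ofList]

theorem pv_all_congr {α : Type} (l : List α) (f g : α → Bool)
    (h : ∀ x ∈ l, f x = g x) : l.all f = l.all g := by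
  induction l with
  | nil => rfl
  | cons x xs ih =>
    simp only [List.all_cons]
    rw [h x (by simp), ih (fun y hy => h y (by simp [hy]))]

-- ===== VERDICT (by name: the statement is the Claim_ definition above) =====
theorem is_perfect_dominating_set_spec : Claim_equal_is_perfect_dominating_set := by
  intro adj subset _ _
  unfold Spec_is_perfect_dominating_set is_perfect_dominating_set is_perfect_dominating_set_alt
  simp only []
  have hrepl : List.replicate adj.length (0 : Int)
      = (PySem.List.pyRange 0 (adj.length : Int) 1).map (fun _ => (0 : Int)) := by
    rw [List.map_const', PySem.List.length_pyRange_one]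
    simp
  rw [hrepl, pv_fold_counts adj subset subset (fun _ => 0)]
  apply pv_all_congr
  intro v hv
  rw [PySem.List.mem_pyRange_one] at hv
  rw [pv_members_contains]
  by_cases hm : subset.contains v
  · have hmem : v ∈ subset := by simpa [List.contains_iff_mem] using hm
    simp [hmem]
  · have hmem : v ∉ subset := by simpa [List.contains_iff_mem] using hm
    simp only [hm, Bool.false_eq_true, if_false, Bool.false_or]
    rw [PySem.List.pyGetD_map_pyRange_of_nonneg _ (adj.length : Int) v 0 hv.1 hv.2]
    simp [hmem]
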